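-- pv_equiv track=rewrite | github.com/jsondoo/AdventOfCode | day04/day04.py | criteria
-- ===== SOURCE A (Python) =====
-- def criteria(n):
--     never_decrease = True
--     adjacent = False
--
--     prev = length = None
--     for i,a in enumerate(str(n)):
--         a = int(a)
--
--         if i == 0:
--             prev = a
--             length = 1
--         else:
--             if a < prev:
--                 never_decrease = False
--
--             if prev == a:
--                 length += 1
--             elif length == 2:
--                 adjacent = True
--             else:
--                 length = 1
--
--             prev = a
--
--     return never_decrease and (length == 2 or adjacent)
-- ===== SOURCE B (Python) =====
-- def criteria(n):
--     digits = [int(c) for c in str(n)]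
--     if not all(x <= y for x, y in zip(digits, digits[1:])):
--         return False
--     return _has_exact_pair(digits)
--
-- def _has_exact_pair(digits):
--     if not digits:
--         return False
--     run = 1
--     while run < len(digits) and digits[run] == digits[0]:
--         run += 1
--     return run == 2 or _has_exact_pair(digits[run:])
-- ===== Notes on version B (the rewrite author's own statement) =====
-- stated objective: simpler
-- what changed: Replaces A's fused single-pass prev/length/adjacent state machine with separate passes: a zip-based pairwise non-decrease check with early return, and a recursive run-skipping helper that tests each maximal digit run for length exactly 2.
import Mathlib
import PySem

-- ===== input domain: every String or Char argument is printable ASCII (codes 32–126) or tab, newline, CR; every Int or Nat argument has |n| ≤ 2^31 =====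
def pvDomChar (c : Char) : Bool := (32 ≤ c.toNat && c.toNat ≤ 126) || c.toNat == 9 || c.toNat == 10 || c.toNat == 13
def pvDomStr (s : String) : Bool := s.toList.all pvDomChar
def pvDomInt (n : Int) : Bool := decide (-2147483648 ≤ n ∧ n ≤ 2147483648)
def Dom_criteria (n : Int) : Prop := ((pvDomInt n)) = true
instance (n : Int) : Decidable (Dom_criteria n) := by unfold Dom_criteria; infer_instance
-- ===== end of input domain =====

-- B replaces A's fused one-pass prev/length/adjacent state machine by separate passes:
-- a zip-based non-decrease check and a recursive leading-run-skipping pair check (simpler decomposition).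

-- ===== PORT A =====
-- int(a) on a single char, exact for digit chars; Pre_ keeps str(n) all digits
def pvDigit (c : Char) : Int := (c.toNat : Int) - 48

-- the for loop of A; prev/length start as Python None but are always assigned (first iteration) before read, a dummy initial value stands in
def criteriaLoop (nd adj : Bool) (prev length i : Int) : List Char → Bool × Bool × Int × Int
  | [] => (nd, adj, prev, length)
  | c :: cs =>
      let a := pvDigit c
      if i == 0 then criteriaLoop nd adj a 1 (i + 1) cs
      else
        let nd' := if a < prev then false else nd
        if prev == a then criteriaLoop nd' adj a (length + 1) (i + 1) cs
        else if length == 2 then criteriaLoop nd' true a length (i + 1) cs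
        else criteriaLoop nd' adj a 1 (i + 1) cs

def criteria (n : Int) : Bool :=
  let st := criteriaLoop true false 0 0 0 (PySem.Int.toStr n).toList
  st.1 && (st.2.2.2 == 2 || st.2.1)

-- ===== PORT B =====
-- the while loop of _has_exact_pair: how many further leading digits equal digits[0]
def leadRun (head : Int) : List Int → Nat
  | [] => 0
  | x :: xs => if x == head then leadRun head xs + 1 else 0

def hasExactPair : List Int → Bool
  | [] => false
  | a :: rest =>
      let run : Nat := leadRun a rest + 1
      (run == 2) || hasExactPair (rest.drop (run - 1))
termination_by l => l.length
decreasing_by simp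

def criteria_alt (n : Int) : Bool :=
  let digits := (PySem.Int.toStr n).toList.map pvDigit
  -- digits[1:] is digits.drop 1
  if !((digits.zip (digits.drop 1)).all fun p => decide (p.1 ≤ p.2)) then false
  else hasExactPair digits

-- ===== PRECONDITION & SPEC =====
-- Pre_ excludes negative n: there str(n) starts with a minus sign and int('-') raises ValueError in A (and in B).
def Pre_criteria (n : Int) : Prop := 0 ≤ n
instance (n : Int) : Decidable (Pre_criteria n) := by unfold Pre_criteria; infer_instance
def pvWitness_criteria : Int := (11)

def Spec_criteria (n : Int) (out : Bool) : Prop := out = criteria_alt n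
instance (n : Int) (out : Bool) : Decidable (Spec_criteria n out) := by unfold Spec_criteria; infer_instance

-- ===== CLAIM (what is proved, stated in full; the proofs are below) =====
def Claim_equal_criteria : Prop := ∀ (n : Int), Dom_criteria n → Pre_criteria n → Spec_criteria n (criteria n)

-- ===== LEMMAS AND PROOFS =====

-- chained non-decrease of prev :: xs
def chainLe (prev : Int) : List Int → Bool
  | [] => true
  | a :: xs => decide (prev ≤ a) && chainLe a xs

-- "some run has length exactly 2", carrying the current run value/length, mirroring A's elif
def runsB (prev len : Int) : List Int → Bool
  | [] => len == 2
  | a :: xs => if prev == a then runsB prev (len + 1) xs else (len == 2) || runsB a 1 xs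

def outOf (st : Bool × Bool × Int × Int) : Bool := st.1 && (st.2.2.2 == 2 || st.2.1)

theorem int_beq_eq_decide (a b : Int) : (a == b) = decide (a = b) := by
  by_cases h : a = b <;> simp [h]

theorem loop_main (xs : List Char) : ∀ (nd adj : Bool) (prev len i : Int), 1 ≤ i →
    outOf (criteriaLoop nd adj prev len i xs)
      = ((nd && chainLe prev (xs.map pvDigit)) && (adj || runsB prev len (xs.map pvDigit))) := by
  induction xs with
  | nil =>
      intro nd adj prev len i _
      simp only [criteriaLoop, outOf, chainLe, runsB, List.map_nil]
      cases nd <;> cases adj <;> simp [Bool.or_comm]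
  | cons c cs ih =>
      intro nd adj prev len i hi
      have hi0 : (i == 0) = false := by simp; omega
      by_cases hpa : prev = pvDigit c
      · have hstep : criteriaLoop nd adj prev len i (c :: cs)
            = criteriaLoop nd adj (pvDigit c) (len + 1) (i + 1) cs := by
          rw [criteriaLoop]
          simp [hi0, hpa]
        rw [hstep, ih nd adj (pvDigit c) (len + 1) (i + 1) (by omega)]
        simp [chainLe, runsB, hpa]
      · have hnd' : (if pvDigit c < prev then false else nd) = (nd && decide (prev ≤ pvDigit c)) := by
          by_cases h : pvDigit c < prev
          · simp [h, show ¬ prev ≤ pvDigit c by omega]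
          · simp [h, show prev ≤ pvDigit c by omega]
        by_cases h2 : len = 2
        · have hstep : criteriaLoop nd adj prev len i (c :: cs)
              = criteriaLoop (if pvDigit c < prev then false else nd) true (pvDigit c) len (i + 1) cs := by
            rw [criteriaLoop]; simp [hi0, hpa, h2]
          rw [hstep, ih _ true (pvDigit c) len (i + 1) (by omega), hnd']
          simp [chainLe, runsB, hpa, h2, int_beq_eq_decide]
          cases nd <;> simp
        · have hstep : criteriaLoop nd adj prev len i (c :: cs)
              = criteriaLoop (if pvDigit c < prev then false else nd) adj (pvDigit c) 1 (i + 1) cs := by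
            rw [criteriaLoop]; simp [hi0, hpa, h2]
          rw [hstep, ih _ adj (pvDigit c) 1 (i + 1) (by omega), hnd']
          simp [chainLe, runsB, hpa, h2, int_beq_eq_decide]
          cases nd <;> simp

theorem runsB_eq (xs : List Int) : ∀ (prev len : Int), 1 ≤ len →
    runsB prev len xs
      = (decide (len + (leadRun prev xs : Int) = 2) || hasExactPair (xs.drop (leadRun prev xs))) := by
  induction xs with
  | nil => intro prev len _; simp [runsB, leadRun, hasExactPair, int_beq_eq_decide]
  | cons a xs ih =>
      intro prev len hlen
      by_cases hpa : prev = a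
      · have hbeq : (prev == a) = true := by simp [hpa]
        have hbeq' : (a == prev) = true := by simp [hpa]
        simp only [runsB, hbeq, if_true, leadRun, hbeq']
        rw [ih prev (len + 1) (by omega)]
        have harith : len + 1 + (leadRun prev xs : Int) = len + ((leadRun prev xs : Int) + 1) := by ring
        have hdrop : (a :: xs).drop (leadRun prev xs + 1) = xs.drop (leadRun prev xs) := by simp
        rw [hdrop]
        push_cast
        rw [harith]
      · have hbeq : (prev == a) = false := by simp [hpa]
        have hbeq' : (a == prev) = false := by simp; omega
        simp only [runsB, hbeq, Bool.false_eq_true, if_false, leadRun, hbeq', List.drop_zero]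
        rw [ih a 1 (by omega)]
        rw [show hasExactPair (a :: xs)
              = ((leadRun a xs + 1 == 2) || hasExactPair (xs.drop (leadRun a xs + 1 - 1))) from by
            rw [hasExactPair]]
        have : leadRun a xs + 1 - 1 = leadRun a xs := by omega
        rw [this]
        by_cases hl : leadRun a xs = 1
        · simp [hl]
        · have hd : (decide ((1:Int) + (leadRun a xs : Int) = 2)) = false := by simp; omega
          have hb : ((leadRun a xs == 1) : Bool) = false := by simp [hl]
          simp [hd, hb, int_beq_eq_decide (len)]

theorem zip_all_eq (xs : List Int) : ∀ (a : Int),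
    (((a :: xs).zip xs).all fun p => decide (p.1 ≤ p.2)) = chainLe a xs := by
  induction xs with
  | nil => intro a; simp [chainLe]
  | cons b xs ih => intro a; simp [chainLe, ih b]

theorem hasExactPair_eq (prev : Int) (xs : List Int) :
    runsB prev 1 xs = hasExactPair (prev :: xs) := by
  rw [runsB_eq xs prev 1 (by omega),
      show hasExactPair (prev :: xs)
        = ((leadRun prev xs + 1 == 2) || hasExactPair (xs.drop (leadRun prev xs + 1 - 1))) from by
        rw [hasExactPair]]
  have h1 : leadRun prev xs + 1 - 1 = leadRun prev xs := by omega
  rw [h1]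
  by_cases hl : leadRun prev xs = 1
  · simp [hl]
  · have hd : (decide ((1:Int) + (leadRun prev xs : Int) = 2)) = false := by simp; omega
    have hb : ((leadRun prev xs == 1) : Bool) = false := by simp [hl]
    simp [hd, hb]

theorem criteria_eq_alt (n : Int) : criteria n = criteria_alt n := by
  unfold criteria criteria_alt
  cases h : (PySem.Int.toStr n).toList with
  -- empty string: both sides are false
  | nil => simp [criteriaLoop, hasExactPair]
  | cons c cs =>
      show outOf (criteriaLoop true false 0 0 0 (c :: cs)) = _
      have h0 : criteriaLoop true false 0 0 0 (c :: cs)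
          = criteriaLoop true false (pvDigit c) 1 1 cs := by
        rw [criteriaLoop]; norm_num
      rw [h0, loop_main cs true false (pvDigit c) 1 1 (by omega)]
      simp only [List.map_cons, List.drop_one, List.tail_cons, zip_all_eq, ← hasExactPair_eq]
      cases hc : chainLe (pvDigit c) (cs.map pvDigit) <;> simp

-- ===== VERDICT (by name: the statement is the Claim_ definition above) =====
theorem criteria_spec : Claim_equal_criteria := by
  intro n _ _
  unfold Spec_criteria
  exact criteria_eq_alt n
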